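-- pv_equiv track=rewrite | github.com/zelunliu/tamubot | rag/pipeline.py | _cap_discovery_courses
-- ===== SOURCE A (Python) =====
-- def _cap_discovery_courses(
--     chunks: list[dict],
--     anchor_course_ids: set[str],
--     max_courses: int,
-- ) -> list[dict]:
--     """Keep all anchor chunks + chunks from at most max_courses unique discovery courses."""
--     admitted: list[str] = []
--     result = []
--     for chunk in chunks:
--         cid = chunk.get("course_id", "")
--         if cid in anchor_course_ids:
--             result.append(chunk)
--         elif cid in admitted:
--             result.append(chunk)
--         elif len(admitted) < max_courses:
--             admitted.append(cid)
--             result.append(chunk)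
--     return result
-- ===== SOURCE B (Python) =====
-- def _cap_discovery_courses(
--     chunks: list[dict],
--     anchor_course_ids: set[str],
--     max_courses: int,
-- ) -> list[dict]:
--     """Keep all anchor chunks + chunks from at most max_courses unique discovery courses."""
--     # Order-preserving dedup of the non-anchor course-id stream, then cap it.
--     discovery_order = dict.fromkeys(
--         c.get("course_id", "")
--         for c in chunks
--         if c.get("course_id", "") not in anchor_course_ids
--     )
--     admitted = set(list(discovery_order)[: max(max_courses, 0)])
--     return [
--         c
--         for c in chunks
--         if c.get("course_id", "") in anchor_course_ids
--         or c.get("course_id", "") in admitted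
--     ]
-- ===== Notes on version B (the rewrite author's own statement) =====
-- stated objective: idiomatic
-- what changed: Replaces A's single interleaved stateful loop (which admits courses under a live cap while appending to the result) with dedup-then-slice-then-filter: dict.fromkeys dedups the non-anchor course-id stream, a slice caps it to max_courses, a set enables O(1) lookups, and a comprehension filters the chunks.
import Mathlib
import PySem

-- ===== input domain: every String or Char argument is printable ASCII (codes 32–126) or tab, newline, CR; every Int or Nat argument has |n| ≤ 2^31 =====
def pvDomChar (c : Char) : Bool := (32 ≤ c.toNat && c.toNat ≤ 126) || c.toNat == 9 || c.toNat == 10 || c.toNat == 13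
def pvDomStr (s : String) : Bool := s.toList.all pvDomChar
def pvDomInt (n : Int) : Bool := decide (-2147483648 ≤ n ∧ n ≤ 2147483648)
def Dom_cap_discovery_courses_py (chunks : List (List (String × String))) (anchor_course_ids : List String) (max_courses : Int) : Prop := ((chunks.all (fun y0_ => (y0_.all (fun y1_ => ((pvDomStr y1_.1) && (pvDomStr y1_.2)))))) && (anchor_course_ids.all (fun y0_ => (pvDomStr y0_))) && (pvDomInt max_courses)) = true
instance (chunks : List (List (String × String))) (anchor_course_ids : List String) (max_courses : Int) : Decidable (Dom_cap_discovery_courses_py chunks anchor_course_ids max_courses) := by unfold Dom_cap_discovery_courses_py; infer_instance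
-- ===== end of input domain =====

-- B replaces A's single interleaved stateful loop (admit-under-a-live-cap while emitting)
-- with dedup-then-slice-then-filter; objective: idiomatic.

-- chunk.get("course_id", "") : first match in the association list, default "" (exact Python dict.get)
def pvCid (c : List (String × String)) : String :=
  match c.find? (fun kv => kv.1 == "course_id") with
  | some kv => kv.2
  | none => ""

-- ===== PORT A =====
-- A's loop, carrying the same state (admitted, result); branches in A's order.
def capA_loop (anchors : List String) (maxc : Int) :
    List (List (String × String)) → List String → List (List (String × String)) → List (List (String × String))
  | [], _, res => res
  | c :: cs, adm, res =>
    let cid := pvCid c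
    if anchors.contains cid then capA_loop anchors maxc cs adm (res ++ [c])
    else if adm.contains cid then capA_loop anchors maxc cs adm (res ++ [c])
    else if (adm.length : Int) < maxc then capA_loop anchors maxc cs (adm ++ [cid]) (res ++ [c])
    else capA_loop anchors maxc cs adm res

def cap_discovery_courses_py (chunks : List (List (String × String))) (anchor_course_ids : List String) (max_courses : Int) : List (List (String × String)) :=
  capA_loop anchor_course_ids max_courses chunks [] []

-- ===== PORT B =====
-- dict.fromkeys over the non-anchor course-id stream = order-preserving dedup (a fold).
def capB_order (anchors : List String) (chunks : List (List (String × String))) : List String :=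
  chunks.foldl
    (fun acc c =>
      let cid := pvCid c
      if anchors.contains cid || acc.contains cid then acc else acc ++ [cid])
    []

def cap_discovery_courses_py_alt (chunks : List (List (String × String))) (anchor_course_ids : List String) (max_courses : Int) : List (List (String × String)) :=
  let admitted := (capB_order anchor_course_ids chunks).take (max max_courses 0).toNat
  chunks.filter (fun c =>
    anchor_course_ids.contains (pvCid c) || admitted.contains (pvCid c))

-- ===== PRECONDITION & SPEC =====
def Spec_cap_discovery_courses_py (chunks : List (List (String × String))) (anchor_course_ids : List String) (max_courses : Int) (out : List (List (String × String))) : Prop := out = cap_discovery_courses_py_alt chunks anchor_course_ids max_courses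
instance (chunks : List (List (String × String))) (anchor_course_ids : List String) (max_courses : Int) (out : List (List (String × String))) : Decidable (Spec_cap_discovery_courses_py chunks anchor_course_ids max_courses out) := by unfold Spec_cap_discovery_courses_py; infer_instance

-- ===== CLAIM (what is proved, stated in full; the proofs are below) =====
def Claim_equal_cap_discovery_courses_py : Prop := ∀ (chunks : List (List (String × String))) (anchor_course_ids : List String) (max_courses : Int), Dom_cap_discovery_courses_py chunks anchor_course_ids max_courses → Spec_cap_discovery_courses_py chunks anchor_course_ids max_courses (cap_discovery_courses_py chunks anchor_course_ids max_courses)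

-- ===== LEMMAS AND PROOFS =====

-- proof-only intermediate: A's admission process, result dropped
def capAux (anchors : List String) (maxc : Int) :
    List (List (String × String)) → List String → List String
  | [], adm => adm
  | c :: cs, adm =>
    let cid := pvCid c
    if ¬ anchors.contains cid ∧ ¬ adm.contains cid ∧ (adm.length : Int) < maxc then
      capAux anchors maxc cs (adm ++ [cid])
    else
      capAux anchors maxc cs adm

-- admitted only grows
theorem capAux_mono (anchors : List String) (maxc : Int)
    (cs : List (List (String × String))) (adm : List String) (x : String)
    (hx : x ∈ adm) : x ∈ capAux anchors maxc cs adm := by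
  induction cs generalizing adm with
  | nil => simpa [capAux] using hx
  | cons c cs ih =>
    simp only [capAux]
    split
    · exact ih _ (by simp [hx])
    · exact ih _ hx

-- once the cap is reached the admitted list never changes
theorem capAux_full (anchors : List String) (maxc : Int)
    (cs : List (List (String × String))) (adm : List String)
    (h : ¬ ((adm.length : Int) < maxc)) : capAux anchors maxc cs adm = adm := by
  induction cs generalizing adm with
  | nil => rfl
  | cons c cs ih =>
    simp only [capAux]
    split
    · exact absurd (by tauto) (by tauto)
    · exact ih _ h

-- A's loop emits exactly the chunks whose course is anchored or finally admitted
theorem capA_loop_eq (anchors : List String) (maxc : Int)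
    (cs : List (List (String × String))) (adm : List String) (res : List (List (String × String))) :
    capA_loop anchors maxc cs adm res =
      res ++ cs.filter (fun c => anchors.contains (pvCid c) ||
        (capAux anchors maxc cs adm).contains (pvCid c)) := by
  induction cs generalizing adm res with
  | nil => simp [capA_loop]
  | cons c cs ih =>
    by_cases h1 : pvCid c ∈ anchors
    · have hA : capA_loop anchors maxc (c :: cs) adm res
          = capA_loop anchors maxc cs adm (res ++ [c]) := by
        simp [capA_loop, h1]
      have hB : capAux anchors maxc (c :: cs) adm = capAux anchors maxc cs adm := by
        simp [capAux, h1]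
      rw [hA, hB, ih]
      simp [h1]
    · by_cases h2 : pvCid c ∈ adm
      · have hA : capA_loop anchors maxc (c :: cs) adm res
            = capA_loop anchors maxc cs adm (res ++ [c]) := by
          simp [capA_loop, h1, h2]
        have hB : capAux anchors maxc (c :: cs) adm = capAux anchors maxc cs adm := by
          simp [capAux, h2]
        rw [hA, hB, ih]
        have := capAux_mono anchors maxc cs adm _ h2
        simp [h1, this]
      · by_cases h3 : (adm.length : Int) < maxc
        · have hA : capA_loop anchors maxc (c :: cs) adm res
              = capA_loop anchors maxc cs (adm ++ [pvCid c]) (res ++ [c]) := by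
            simp [capA_loop, h1, h2, h3]
          have hB : capAux anchors maxc (c :: cs) adm
              = capAux anchors maxc cs (adm ++ [pvCid c]) := by
            simp [capAux, h1, h2, h3]
          rw [hA, hB, ih]
          have hm : pvCid c ∈ capAux anchors maxc cs (adm ++ [pvCid c]) :=
            capAux_mono anchors maxc cs _ _ (by simp)
          simp [hm]
        · have hA : capA_loop anchors maxc (c :: cs) adm res
              = capA_loop anchors maxc cs adm res := by
            simp [capA_loop, h1, h2, h3]
          have hB : capAux anchors maxc (c :: cs) adm = capAux anchors maxc cs adm := by
            simp [capAux, h3]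
          rw [hA, hB, ih, capAux_full anchors maxc cs adm h3]
          simp [h1, h2]

-- the dedup fold only ever appends: its start is a prefix of its result
theorem capB_fold_prefix (anchors : List String)
    (cs : List (List (String × String))) (acc : List String) :
    ∃ t, cs.foldl
      (fun acc c =>
        let cid := pvCid c
        if anchors.contains cid || acc.contains cid then acc else acc ++ [cid]) acc
      = acc ++ t := by
  induction cs generalizing acc with
  | nil => exact ⟨[], by simp⟩
  | cons c cs ih =>
    simp only [List.foldl]
    split
    · exact ih acc
    · obtain ⟨t, ht⟩ := ih (acc ++ [pvCid c])
      exact ⟨pvCid c :: t, by simpa using ht⟩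

-- A's admission = uncapped dedup, truncated at the cap
theorem capAux_eq_take (anchors : List String) (maxc : Int)
    (cs : List (List (String × String))) (adm : List String) :
    capAux anchors maxc cs adm =
      (cs.foldl
        (fun acc c =>
          let cid := pvCid c
          if anchors.contains cid || acc.contains cid then acc else acc ++ [cid]) adm).take
        (max maxc.toNat adm.length) := by
  induction cs generalizing adm with
  | nil =>
    simp only [capAux, List.foldl]
    rw [List.take_of_length_le (by omega)]
  | cons c cs ih =>
    simp only [capAux, List.foldl]
    by_cases h1 : anchors.contains (pvCid c) || adm.contains (pvCid c)
    · have : ¬ (¬ anchors.contains (pvCid c) ∧ ¬ adm.contains (pvCid c)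
          ∧ ((adm.length : Int) < maxc)) := by
        rintro ⟨ha, hb, -⟩
        rcases Bool.or_eq_true _ _ |>.mp h1 with h | h
        · exact ha h
        · exact hb h
      rw [if_neg this, if_pos h1]
      exact ih adm
    · rw [if_neg h1]
      have h1' : ¬ anchors.contains (pvCid c) ∧ ¬ adm.contains (pvCid c) := by
        simpa [not_or] using h1
      by_cases h3 : (adm.length : Int) < maxc
      · rw [if_pos ⟨h1'.1, h1'.2, h3⟩, ih]
        have : max maxc.toNat (adm ++ [pvCid c]).length = max maxc.toNat adm.length := by
          simp only [List.length_append, List.length_cons, List.length_nil]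
          omega
        rw [this]
      · rw [if_neg (by tauto), capAux_full anchors maxc cs adm h3]
        obtain ⟨t, ht⟩ := capB_fold_prefix anchors cs (adm ++ [pvCid c])
        rw [ht]
        have hmax : max maxc.toNat adm.length = adm.length := by omega
        rw [hmax, List.append_assoc, List.take_left]

-- ===== VERDICT (by name: the statement is the Claim_ definition above) =====
theorem cap_discovery_courses_py_spec : Claim_equal_cap_discovery_courses_py := by
  intro chunks anchors maxc _
  unfold Spec_cap_discovery_courses_py cap_discovery_courses_py cap_discovery_courses_py_alt capB_order
  rw [capA_loop_eq, capAux_eq_take]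
  have : (max maxc 0).toNat = max maxc.toNat ([] : List String).length := by
    simp; omega
  rw [this]
  simp
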